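-- pv_equiv track=rewrite | github.com/intel/xml-cli | src/xmlcli_mod/common/utils.py | _max_col_width
-- ===== SOURCE A (Python) =====
-- def _max_col_width(data=[[], []]):
--   """Private class method Used within class member to dynamically calculate width if user does not provides width
--   however, to calculate the same at least 2 data row required.
--
--   :param data: a list contains data (2D list)
--   :return: returns a list which contains width of each column
--   """
--   column_width = 0
--   if isinstance(data, list):
--     data_length = [len(row) for row in data]
--     for row in data:  # handling data with different length.
--       while len(row) < max(data_length):
--         row.append("")
--     column_width = [(max([len(str(row[i])) for row in data]) + 3) for i in range(len(data[0]))]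
--   return column_width
-- ===== SOURCE B (Python) =====
-- def _max_col_width(data=[[], []]):
--     column_width = 0
--     if isinstance(data, list):
--         lengths = [len(row) for row in data]
--         for row in data:  # same in-place padding (mutation identical to A)
--             row += [""] * (max(lengths) - len(row))
--         widths = [0] * len(data[0])
--         for row in data:  # single row-major pass maintaining a per-column max table
--             widths = [max(w, len(str(c))) for w, c in zip(widths, row)]
--         column_width = [w + 3 for w in widths]
--     return column_width
-- ===== Notes on version B (the rewrite author's own statement) =====
-- stated objective: alternative
-- what changed: A rescans all rows per column (column-major nested comprehension with an inner max over rows for each column index); B makes a single row-major pass maintaining a per-column running-max table and adds 3 at the end; the in-place row padding is kept identical.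
import Mathlib
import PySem

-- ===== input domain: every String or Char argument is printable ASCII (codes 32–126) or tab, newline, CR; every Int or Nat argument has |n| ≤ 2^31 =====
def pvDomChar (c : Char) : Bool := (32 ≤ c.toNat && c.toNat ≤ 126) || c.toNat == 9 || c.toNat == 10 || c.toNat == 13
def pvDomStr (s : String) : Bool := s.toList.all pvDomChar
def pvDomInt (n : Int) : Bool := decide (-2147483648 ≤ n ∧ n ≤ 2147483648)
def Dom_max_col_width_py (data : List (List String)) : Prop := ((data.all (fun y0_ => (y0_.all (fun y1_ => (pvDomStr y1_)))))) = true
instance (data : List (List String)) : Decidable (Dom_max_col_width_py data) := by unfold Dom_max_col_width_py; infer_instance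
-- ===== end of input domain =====

-- B replaces A's per-column rescan of all rows by a single row-major pass over a
-- per-column max table (return-value equivalence; both pad rows in place identically).

-- ===== PORT A =====
-- 'while len(row) < m: row.append("")'
def pvPadWhile (row : List String) (m : Int) : List String :=
  if (row.length : Int) < m then pvPadWhile (row ++ [""]) m else row
termination_by (m - row.length).toNat
decreasing_by simp; omega

def max_col_width_py (data : List (List String)) : List Int :=
  let data_length : List Int := data.map (fun row => PySem.List.len row)
  let m : Int := ((PySem.List.max? data_length (fun x => x)).getD 0)
  let padded : List (List String) := data.map (fun row => pvPadWhile row m)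
  let first : List String := (PySem.List.pyGet? padded 0).getD []
  (PySem.List.pyRange 0 (PySem.List.len first) 1).map
    (fun i =>
      ((PySem.List.max?
          (padded.map (fun row => PySem.Str.len ((PySem.List.pyGet? row i).getD "")))
          (fun x => x)).getD 0) + 3)

-- ===== PORT B =====
def max_col_width_py_alt (data : List (List String)) : List Int :=
  let lengths : List Int := data.map (fun row => PySem.List.len row)
  let m : Int := ((PySem.List.max? lengths (fun x => x)).getD 0)
  let padded : List (List String) :=
    data.map (fun row => row ++ List.replicate (m - (row.length : Int)).toNat "")
  let n : Nat := ((PySem.List.pyGet? padded 0).getD []).length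
  let widths : List Int :=
    padded.foldl (fun ws row => List.zipWith (fun w c => max w (PySem.Str.len c)) ws row)
      (List.replicate n (0 : Int))
  widths.map (fun w => w + 3)

-- ===== PRECONDITION & SPEC =====
-- Pre_ excludes only data = [], on which Python A raises IndexError at data[0].
def Pre_max_col_width_py (data : List (List String)) : Prop := data ≠ []
instance (data : List (List String)) : Decidable (Pre_max_col_width_py data) := by
  unfold Pre_max_col_width_py; infer_instance
def pvWitness_max_col_width_py : List (List String) := [["ab", "c"], ["x"]]

def Spec_max_col_width_py (data : List (List String)) (out : List Int) : Prop := out = max_col_width_py_alt data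
instance (data : List (List String)) (out : List Int) : Decidable (Spec_max_col_width_py data out) := by unfold Spec_max_col_width_py; infer_instance

-- ===== CLAIM (what is proved, stated in full; the proofs are below) =====
def Claim_equal_max_col_width_py : Prop := ∀ (data : List (List String)), Dom_max_col_width_py data → Pre_max_col_width_py data → Spec_max_col_width_py data (max_col_width_py data)


-- ===== LEMMAS AND PROOFS =====

-- the while-loop padding is append-of-replicate
theorem pvPadWhile_eq_aux (fuel : Nat) : ∀ (row : List String) (m : Int),
    (m - (row.length : Int)).toNat = fuel →
    pvPadWhile row m = row ++ List.replicate fuel "" := by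
  induction fuel with
  | zero =>
    intro row m h
    rw [pvPadWhile, if_neg (by omega)]
    simp
  | succ f ih =>
    intro row m h
    rw [pvPadWhile, if_pos (by omega)]
    rw [ih (row ++ [""]) m (by simp; omega)]
    simp [List.replicate_succ]

theorem pvPadWhile_eq (row : List String) (m : Int) :
    pvPadWhile row m = row ++ List.replicate (m - (row.length : Int)).toNat "" :=
  pvPadWhile_eq_aux _ row m rfl

def pvStep (ws : List Int) (row : List String) : List Int :=
  List.zipWith (fun w c => max w (PySem.Str.len c)) ws row

theorem pvStep_length (ws : List Int) (row : List String) (h : row.length = ws.length) :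
    (pvStep ws row).length = ws.length := by
  simp [pvStep, h]

theorem pvStep_getD (ws : List Int) (row : List String) (h : row.length = ws.length)
    (i : Nat) (hi : i < ws.length) :
    (pvStep ws row).getD i 0 = max (ws.getD i 0) (PySem.Str.len (row.getD i "")) := by
  simp [pvStep, List.getD, List.getElem?_zipWith, List.getElem?_eq_getElem (l := ws) hi,
    List.getElem?_eq_getElem (l := row) (by omega : i < row.length)]

theorem pvFold_length (P : List (List String)) (ws : List Int)
    (h : ∀ r ∈ P, r.length = ws.length) :
    (P.foldl pvStep ws).length = ws.length := by
  induction P generalizing ws with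
  | nil => rfl
  | cons x t ih =>
    have hx : x.length = ws.length := h x (List.mem_cons_self ..)
    have := ih (pvStep ws x) (by intro r hr; rw [pvStep_length ws x hx]; exact h r (List.mem_cons_of_mem _ hr))
    simp only [List.foldl_cons, this, pvStep_length ws x hx]

theorem pvFold_getD (P : List (List String)) (ws : List Int)
    (h : ∀ r ∈ P, r.length = ws.length) (i : Nat) (hi : i < ws.length) :
    (P.foldl pvStep ws).getD i 0
      = P.foldl (fun a r => max a (PySem.Str.len (r.getD i ""))) (ws.getD i 0) := by
  induction P generalizing ws with
  | nil => rfl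
  | cons x t ih =>
    have hx : x.length = ws.length := h x (List.mem_cons_self ..)
    have hlen := pvStep_length ws x hx
    simp only [List.foldl_cons]
    rw [ih (pvStep ws x) (by intro r hr; rw [hlen]; exact h r (List.mem_cons_of_mem _ hr))
        (by omega), pvStep_getD ws x hx i hi]

-- Python's max(list) on a nonempty list of nonnegative ints is the running max from 0
theorem pvMax_eq_foldl (x : List String) (t : List (List String)) (g : List String → Int)
    (hg : 0 ≤ g x) :
    ((PySem.List.max? ((x :: t).map g) (fun y => y)).getD 0)
      = (x :: t).foldl (fun a r => max a (g r)) 0 := by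
  rw [List.map_cons, PySem.List.max?_id_cons, Option.getD_some, List.foldl_cons,
    ← List.foldl_map]
  have hmx : max 0 (g x) = g x := by omega
  rw [hmx]
  simp [List.foldl_map]

-- column-major max-per-column equals the row-major table fold, for an equal-width matrix
theorem pvMain (P : List (List String)) (n : Nat) (hP : P ≠ [])
    (hlen : ∀ r ∈ P, r.length = n) :
    (PySem.List.pyRange 0 (n : Int) 1).map
        (fun i => ((PySem.List.max?
            (P.map (fun row => PySem.Str.len ((PySem.List.pyGet? row i).getD "")))
            (fun x => x)).getD 0) + 3)
      = (P.foldl pvStep (List.replicate n (0 : Int))).map (fun w => w + 3) := by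
  have hfl : (P.foldl pvStep (List.replicate n (0 : Int))).length = n := by
    rw [pvFold_length P _ (by simpa using hlen)]; simp
  apply List.ext_getElem?
  intro k
  by_cases hk : k < n
  · rw [PySem.List.getElem?_map_pyRange_zero _ n k hk,
      List.getElem?_map, List.getElem?_eq_getElem (by omega : k < (P.foldl pvStep (List.replicate n (0:Int))).length)]
    simp only [Option.map_some]
    congr 1
    have hget : (P.foldl pvStep (List.replicate n (0:Int)))[k] =
        (P.foldl pvStep (List.replicate n (0:Int))).getD k 0 := by
      rw [List.getD, List.getElem?_eq_getElem (by omega), Option.getD_some]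
    rw [hget, pvFold_getD P _ (by simpa using hlen) k (by simpa using hk)]
    obtain ⟨x, t, rfl⟩ : ∃ x t, P = x :: t := by
      cases P with
      | nil => exact absurd rfl hP
      | cons x t => exact ⟨x, t, rfl⟩
    have hrw : ∀ r ∈ x :: t, PySem.Str.len ((PySem.List.pyGet? r ((k : Nat) : Int)).getD "")
        = PySem.Str.len (r.getD k "") := by
      intro r _
      rw [PySem.List.pyGet?_natCast]
      rfl
    rw [List.map_congr_left hrw,
      pvMax_eq_foldl x t (fun r => PySem.Str.len (r.getD k "")) (by simp)]
    have : (List.replicate n (0:Int)).getD k 0 = 0 := by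
      simp [List.getD, hk]
    rw [this]
  · rw [List.getElem?_eq_none, List.getElem?_eq_none]
    · simp [hfl]; omega
    · simp [PySem.List.length_pyRange_one]; omega

-- ===== VERDICT (by name: the statement is the Claim_ definition above) =====
theorem max_col_width_py_spec : Claim_equal_max_col_width_py := by
  intro data hdom hpre
  unfold Spec_max_col_width_py max_col_width_py max_col_width_py_alt
  simp only []
  obtain ⟨x, t, rfl⟩ : ∃ x t, data = x :: t := by
    cases data with
    | nil => exact absurd rfl hpre
    | cons x t => exact ⟨x, t, rfl⟩
  -- shared values
  set m : Int := ((PySem.List.max? ((x :: t).map (fun row => PySem.List.len row)) (fun y => y)).getD 0) with hm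
  have hmax : ∀ r ∈ x :: t, (r.length : Int) ≤ m := by
    intro r hr
    have h1 : PySem.List.max? ((x :: t).map (fun row => PySem.List.len row)) (fun y => y)
        = some ((t.map (fun row => PySem.List.len row)).foldl max (PySem.List.len x)) := by
      rw [List.map_cons, PySem.List.max?_id_cons]
    have h2 := PySem.List.max?_isMax h1 (PySem.List.len r) (List.mem_map_of_mem hr)
    rw [hm, h1, Option.getD_some]
    simpa using h2
  have hpadded : (x :: t).map (fun row => pvPadWhile row m)
      = (x :: t).map (fun row => row ++ List.replicate (m - (row.length : Int)).toNat "") := by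
    apply List.map_congr_left
    intro r _
    exact pvPadWhile_eq r m
  set P : List (List String) := (x :: t).map (fun row => row ++ List.replicate (m - (row.length : Int)).toNat "") with hPdef
  have hPne : P ≠ [] := by simp [hPdef]
  have hrowlen : ∀ r ∈ P, r.length = m.toNat := by
    intro r hr
    rw [hPdef] at hr
    obtain ⟨r0, hr0, rfl⟩ := List.mem_map.mp hr
    have := hmax r0 hr0
    simp
    omega
  have hfirst : (PySem.List.pyGet? P 0).getD [] = x ++ List.replicate (m - (x.length : Int)).toNat "" := by
    rw [hPdef]
    simp
  have hfirstlen : ((PySem.List.pyGet? P 0).getD []).length = m.toNat := by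
    apply hrowlen
    rw [hfirst, hPdef]
    simp
  rw [hpadded, hfirst]
  have hlenfirst : PySem.List.len (x ++ List.replicate (m - (x.length : Int)).toNat "") = (m.toNat : Int) := by
    rw [PySem.List.len_eq, ← hfirst, hfirstlen]
  rw [hlenfirst]
  have := pvMain P m.toNat hPne hrowlen
  rw [hfirst] at hfirstlen
  rw [hfirstlen]
  simpa [pvStep, hPdef] using this
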